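-- pv_equiv track=rewrite | github.com/12Boti/SoME | test.py | convexCheck
-- ===== SOURCE A (Python) =====
-- points = [
--     [1, 3, 0],
--     [0, 2, 0],
--     [0, 0, 0],
--     [-3, 0, 0],
--     [-1, -1, 0],
--     [0, -3, 0],
--     [1, -1, 0],
--     [4, 0, 0],
--     [2, 1, 0],
-- ]
--
-- def convexCheck(a: list, b: list) -> bool:
--
--     check = 0 # -1 => on left side, 0 => on the line, 1 => on the right side
--     if (a[0] == b[0]):
--
--         for p in points:
--
--             if (p[0] < a[0]):
--
--                 if (check == 1):
--                     return False
--                 else: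
--                     check = -1
--
--             elif (p[0] > a[0]):
--
--                 if (check == -1):
--                     return False
--                 else:
--                     check = 1
--
--         return True
--
--     else:
--         c = [a[0]-b[0], a[1]-b[1], a[2]-b[2]]
--         for p in points:
--             d = [p[0]-b[0], p[1]-b[1], p[2]-b[2]]
--             if (c[0]*d[1] - c[1]*d[0] < 0): # cross product
--                 if (check == 1):
--                     return False
--                 else :
--                     check = -1
--
--             elif c[0]*d[1] - c[1]*d[0] > 0:
--                 if (check == -1):
--                     return False
--                 else:
--                     check = 1
--         return True
-- ===== SOURCE B (Python) =====
-- points = [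
--     [1, 3, 0],
--     [0, 2, 0],
--     [0, 0, 0],
--     [-3, 0, 0],
--     [-1, -1, 0],
--     [0, -3, 0],
--     [1, -1, 0],
--     [4, 0, 0],
--     [2, 1, 0],
-- ]
--
-- def convexCheck(a: list, b: list) -> bool:
--     if a[0] == b[0]:
--         xs = [p[0] for p in points]
--         return not (min(xs) < a[0] < max(xs))
--     cx, cy = a[0] - b[0], a[1] - b[1]
--     vals = [cx * (p[1] - b[1]) - cy * (p[0] - b[0]) for p in points]
--     return not (min(vals) < 0 < max(vals))
-- ===== Notes on version B (the rewrite author's own statement) =====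
-- stated objective: alternative
-- what changed: A classifies each point into a side and early-returns when both sides have occurred; B never classifies points: it reduces each branch to order statistics, computing the minimum and maximum of the relevant values (x-coordinates resp. cross products) and returning whether the threshold (a[0] resp. 0) does NOT lie strictly between them.
import Mathlib
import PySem

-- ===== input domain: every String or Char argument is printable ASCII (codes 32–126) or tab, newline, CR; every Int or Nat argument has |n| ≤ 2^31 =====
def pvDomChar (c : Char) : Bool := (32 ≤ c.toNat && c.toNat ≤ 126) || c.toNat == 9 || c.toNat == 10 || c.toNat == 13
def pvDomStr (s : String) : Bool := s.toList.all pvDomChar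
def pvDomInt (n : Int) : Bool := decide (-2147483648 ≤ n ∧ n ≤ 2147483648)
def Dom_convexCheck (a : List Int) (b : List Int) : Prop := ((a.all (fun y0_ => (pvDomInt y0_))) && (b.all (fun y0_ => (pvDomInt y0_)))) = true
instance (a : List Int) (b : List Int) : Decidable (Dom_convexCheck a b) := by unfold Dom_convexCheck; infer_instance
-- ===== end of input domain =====

-- B replaces A's per-point side classification with early exit by order statistics:
-- it checks whether the threshold lies strictly between min and max of the values (objective: alternative).

-- the module-level constant `points` (each point as a triple)
def pvPoints : List (Int × Int × Int) :=
  [(1, 3, 0), (0, 2, 0), (0, 0, 0), (-3, 0, 0), (-1, -1, 0),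
   (0, -3, 0), (1, -1, 0), (4, 0, 0), (2, 1, 0)]

-- ===== PORT A =====
-- the `for p in points` loop of the vertical-line branch (early `return False` = result false)
def convexCheckLoop1 (a0 check : Int) : List (Int × Int × Int) → Bool
  | [] => true
  | p :: ps =>
    if p.1 < a0 then
      if check = 1 then false else convexCheckLoop1 a0 (-1) ps
    else if p.1 > a0 then
      if check = -1 then false else convexCheckLoop1 a0 1 ps
    else convexCheckLoop1 a0 check ps

-- the `for p in points` loop of the cross-product branch
def convexCheckLoop2 (c0 c1 b0 b1 check : Int) : List (Int × Int × Int) → Bool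
  | [] => true
  | p :: ps =>
    let d0 := p.1 - b0
    let d1 := p.2.1 - b1
    if c0 * d1 - c1 * d0 < 0 then
      if check = 1 then false else convexCheckLoop2 c0 c1 b0 b1 (-1) ps
    else if c0 * d1 - c1 * d0 > 0 then
      if check = -1 then false else convexCheckLoop2 c0 c1 b0 b1 1 ps
    else convexCheckLoop2 c0 c1 b0 b1 check ps

-- a[0], b[0], a[1], b[1]: in-range under Pre_ (the .getD 0 is never taken there)
def convexCheck (a : List Int) (b : List Int) : Bool :=
  let a0 := (PySem.List.pyGet? a 0).getD 0
  let b0 := (PySem.List.pyGet? b 0).getD 0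
  if a0 = b0 then
    convexCheckLoop1 a0 0 pvPoints
  else
    -- c = [a[0]-b[0], a[1]-b[1], a[2]-b[2]]; c[2] is never read by the loop
    let c0 := a0 - b0
    let c1 := (PySem.List.pyGet? a 1).getD 0 - (PySem.List.pyGet? b 1).getD 0
    let b1 := (PySem.List.pyGet? b 1).getD 0
    convexCheckLoop2 c0 c1 b0 b1 0 pvPoints

-- ===== PORT B =====
-- min(vs) / max(vs): vs is a map over the nonempty literal `points`, so Python never raises;
-- the .getD 0 default of min?/max? is never taken.
def pvMin (vs : List Int) : Int := (PySem.List.min? vs id).getD 0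
def pvMax (vs : List Int) : Int := (PySem.List.max? vs id).getD 0

def convexCheck_alt (a : List Int) (b : List Int) : Bool :=
  let a0 := (PySem.List.pyGet? a 0).getD 0
  let b0 := (PySem.List.pyGet? b 0).getD 0
  if a0 = b0 then
    let xs := pvPoints.map (fun p => p.1)
    !(decide (pvMin xs < a0) && decide (a0 < pvMax xs))
  else
    let cx := a0 - b0
    let cy := (PySem.List.pyGet? a 1).getD 0 - (PySem.List.pyGet? b 1).getD 0
    let b1 := (PySem.List.pyGet? b 1).getD 0
    let vals := pvPoints.map (fun p => cx * (p.2.1 - b1) - cy * (p.1 - b0))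
    !(decide (pvMin vals < 0) && decide (0 < pvMax vals))

-- ===== PRECONDITION & SPEC =====
-- Pre_ excludes exactly the inputs where Python A raises IndexError: an empty a or b
-- (a[0]/b[0]), and, when a[0] ≠ b[0], lists shorter than 3 (a[2]/b[2] in building c/d).
def Pre_convexCheck (a : List Int) (b : List Int) : Prop :=
  1 ≤ a.length ∧ 1 ≤ b.length ∧
    (a.getD 0 0 = b.getD 0 0 ∨ (3 ≤ a.length ∧ 3 ≤ b.length))
instance (a : List Int) (b : List Int) : Decidable (Pre_convexCheck a b) := by
  unfold Pre_convexCheck; infer_instance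

def pvWitness_convexCheck : List Int × List Int := ([0, 1, 2], [0, 5, 7])

def Spec_convexCheck (a : List Int) (b : List Int) (out : Bool) : Prop := out = convexCheck_alt a b
instance (a : List Int) (b : List Int) (out : Bool) : Decidable (Spec_convexCheck a b out) := by
  unfold Spec_convexCheck; infer_instance

-- ===== CLAIM (what is proved, stated in full; the proofs are below) =====
def Claim_equal_convexCheck : Prop := ∀ (a : List Int) (b : List Int), Dom_convexCheck a b → Pre_convexCheck a b → Spec_convexCheck a b (convexCheck a b)

-- ===== LEMMAS AND PROOFS =====

-- positive / negative side indicators for an arbitrary value function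
def pvHasLt (f : (Int × Int × Int) → Int) (t : Int) (ps : List (Int × Int × Int)) : Bool :=
  ps.any (fun p => f p < t)
def pvHasGt (f : (Int × Int × Int) → Int) (t : Int) (ps : List (Int × Int × Int)) : Bool :=
  ps.any (fun p => t < f p)

lemma hasLt_cons (f : (Int × Int × Int) → Int) (t : Int) (p : Int × Int × Int)
    (ps : List (Int × Int × Int)) :
    pvHasLt f t (p :: ps) = (decide (f p < t) || pvHasLt f t ps) := by
  simp [pvHasLt]

lemma hasGt_cons (f : (Int × Int × Int) → Int) (t : Int) (p : Int × Int × Int)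
    (ps : List (Int × Int × Int)) :
    pvHasGt f t (p :: ps) = (decide (t < f p) || pvHasGt f t ps) := by
  simp [pvHasGt]

lemma loop1_char (a0 : Int) (ps : List (Int × Int × Int)) (check : Int) :
    convexCheckLoop1 a0 check ps =
      !((pvHasLt (fun p => p.1) a0 ps && pvHasGt (fun p => p.1) a0 ps) ||
        (decide (check = 1) && pvHasLt (fun p => p.1) a0 ps) ||
        (decide (check = -1) && pvHasGt (fun p => p.1) a0 ps)) := by
  induction ps generalizing check with
  | nil => simp [convexCheckLoop1, pvHasLt, pvHasGt]
  | cons p ps ih =>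
    by_cases hn : p.1 < a0
    · by_cases hc : check = 1
      · simp [convexCheckLoop1, hn, hc, hasLt_cons, hasGt_cons]
      · rw [convexCheckLoop1, if_pos hn, if_neg hc, ih]
        cases hA : pvHasLt (fun p => p.1) a0 ps <;>
          cases hB : pvHasGt (fun p => p.1) a0 ps <;>
            simp [hasLt_cons, hasGt_cons, hA, hB, hc, hn] <;> omega
    · by_cases hp : p.1 > a0
      · by_cases hc : check = -1
        · simp [convexCheckLoop1, hn, hp, hc, hasLt_cons, hasGt_cons]
        · rw [convexCheckLoop1, if_neg hn, if_pos hp, if_neg hc, ih]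
          cases hA : pvHasLt (fun p => p.1) a0 ps <;>
            cases hB : pvHasGt (fun p => p.1) a0 ps <;>
              simp [hasLt_cons, hasGt_cons, hA, hB, hc, hn, hp]
      · rw [convexCheckLoop1, if_neg hn, if_neg hp, ih]
        simp [hasLt_cons, hasGt_cons, hn, hp]

lemma loop2_char (c0 c1 b0 b1 : Int) (ps : List (Int × Int × Int)) (check : Int) :
    convexCheckLoop2 c0 c1 b0 b1 check ps =
      !((pvHasLt (fun p => c0 * (p.2.1 - b1) - c1 * (p.1 - b0)) 0 ps &&
         pvHasGt (fun p => c0 * (p.2.1 - b1) - c1 * (p.1 - b0)) 0 ps) ||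
        (decide (check = 1) && pvHasLt (fun p => c0 * (p.2.1 - b1) - c1 * (p.1 - b0)) 0 ps) ||
        (decide (check = -1) && pvHasGt (fun p => c0 * (p.2.1 - b1) - c1 * (p.1 - b0)) 0 ps)) := by
  induction ps generalizing check with
  | nil => simp [convexCheckLoop2, pvHasLt, pvHasGt]
  | cons p ps ih =>
    by_cases hn : c0 * (p.2.1 - b1) - c1 * (p.1 - b0) < 0
    · have hn' : c0 * (p.2.1 - b1) < c1 * (p.1 - b0) := sub_neg.mp hn
      have hp' : ¬ c1 * (p.1 - b0) < c0 * (p.2.1 - b1) := lt_asymm hn'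
      by_cases hc : check = 1
      · simp [convexCheckLoop2, hn, hc, hasLt_cons, hasGt_cons]
      · rw [convexCheckLoop2]
        simp only [if_pos hn, if_neg hc, ih]
        cases hA : pvHasLt (fun p => c0 * (p.2.1 - b1) - c1 * (p.1 - b0)) 0 ps <;>
          cases hB : pvHasGt (fun p => c0 * (p.2.1 - b1) - c1 * (p.1 - b0)) 0 ps <;>
            simp [hasLt_cons, hasGt_cons, hA, hB, hc, hn', hp']
    · by_cases hp : c0 * (p.2.1 - b1) - c1 * (p.1 - b0) > 0
      · have hp' : c1 * (p.1 - b0) < c0 * (p.2.1 - b1) := sub_pos.mp hp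
        have hn' : ¬ c0 * (p.2.1 - b1) < c1 * (p.1 - b0) := lt_asymm hp'
        by_cases hc : check = -1
        · simp [convexCheckLoop2, hc, hasLt_cons, hasGt_cons, hn', hp']
        · rw [convexCheckLoop2]
          simp only [if_neg hn, if_pos hp, if_neg hc, ih]
          cases hA : pvHasLt (fun p => c0 * (p.2.1 - b1) - c1 * (p.1 - b0)) 0 ps <;>
            cases hB : pvHasGt (fun p => c0 * (p.2.1 - b1) - c1 * (p.1 - b0)) 0 ps <;>
              simp [hasLt_cons, hasGt_cons, hA, hB, hc, hn', hp']
      · have hn' : ¬ c0 * (p.2.1 - b1) < c1 * (p.1 - b0) := fun h => hn (sub_neg.mpr h)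
        have hp' : ¬ c1 * (p.1 - b0) < c0 * (p.2.1 - b1) := fun h => hp (sub_pos.mpr h)
        rw [convexCheckLoop2]
        simp only [if_neg hn, if_neg hp, ih]
        simp [hasLt_cons, hasGt_cons, hn', hp']

-- min of a nonempty value list is below t iff some value is
lemma pvMinLtIff (f : (Int × Int × Int) → Int) (t : Int) (p : Int × Int × Int)
    (ps : List (Int × Int × Int)) :
    decide (pvMin ((p :: ps).map f) < t) = pvHasLt f t (p :: ps) := by
  obtain ⟨m, hm⟩ : ∃ m, PySem.List.min? ((f p) :: ps.map f) id = some m := by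
    cases hmm : PySem.List.min? ((f p) :: ps.map f) id with
    | none => simpa using (PySem.List.min?_eq_none_iff _ id).mp hmm
    | some m => exact ⟨m, rfl⟩
  rw [Bool.eq_iff_iff]
  have hmem : m ∈ (p :: ps).map f := PySem.List.min?_mem (by simpa using hm)
  have hle : ∀ y ∈ (p :: ps).map f, m ≤ y := fun y hy =>
    PySem.List.min?_id_le (by simpa using hm) y hy
  simp only [pvMin, List.map_cons, hm, Option.getD_some, pvHasLt, decide_eq_true_eq,
    List.any_eq_true, decide_eq_true_eq]
  constructor
  · intro hmt
    obtain ⟨q, hq, hfq⟩ := List.mem_map.mp hmem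
    exact ⟨q, hq, hfq ▸ hmt⟩
  · rintro ⟨q, hq, hqt⟩
    exact lt_of_le_of_lt (hle (f q) (List.mem_map.mpr ⟨q, hq, rfl⟩)) hqt

lemma pvMaxGtIff (f : (Int × Int × Int) → Int) (t : Int) (p : Int × Int × Int)
    (ps : List (Int × Int × Int)) :
    decide (t < pvMax ((p :: ps).map f)) = pvHasGt f t (p :: ps) := by
  obtain ⟨m, hm⟩ : ∃ m, PySem.List.max? ((f p) :: ps.map f) id = some m := by
    cases hmm : PySem.List.max? ((f p) :: ps.map f) id with
    | none => simpa using (PySem.List.max?_eq_none_iff _ id).mp hmm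
    | some m => exact ⟨m, rfl⟩
  rw [Bool.eq_iff_iff]
  have hmem : m ∈ (p :: ps).map f := PySem.List.max?_mem (by simpa using hm)
  have hle : ∀ y ∈ (p :: ps).map f, y ≤ m := fun y hy =>
    PySem.List.max?_isMax (by simpa using hm) y hy
  simp only [pvMax, List.map_cons, hm, Option.getD_some, pvHasGt, decide_eq_true_eq,
    List.any_eq_true, decide_eq_true_eq]
  constructor
  · intro hmt
    obtain ⟨q, hq, hfq⟩ := List.mem_map.mp hmem
    exact ⟨q, hq, hfq ▸ hmt⟩
  · rintro ⟨q, hq, hqt⟩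
    exact lt_of_lt_of_le hqt (hle (f q) (List.mem_map.mpr ⟨q, hq, rfl⟩))

-- ===== VERDICT (by name: the statement is the Claim_ definition above) =====
theorem convexCheck_spec : Claim_equal_convexCheck := by
  intro a b _ _
  unfold Spec_convexCheck convexCheck convexCheck_alt
  by_cases h : (PySem.List.pyGet? a 0).getD 0 = (PySem.List.pyGet? b 0).getD 0
  · simp only [h, if_true]
    rw [loop1_char, show pvPoints = (1, 3, 0) :: pvPoints.tail from rfl,
      pvMinLtIff (fun p => p.1), pvMaxGtIff (fun p => p.1)]
    simp
  · simp only [if_neg h]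
    rw [loop2_char, show pvPoints = (1, 3, 0) :: pvPoints.tail from rfl,
      pvMinLtIff, pvMaxGtIff]
    simp
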